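-- pv_equiv track=rewrite | github.com/FelippeVelosoMarinho/RoboticaMovel_UFMG | tp_Final/roadmap.py | find_polygons
-- ===== SOURCE A (Python) =====
-- def find_polygons(edges):
--     polys = []
--     while edges:
--         polygon = []
--         start_edge = edges.pop(0)
--         current_point = start_edge[0]
--         polygon.append(current_point)
--
--         while True:
--             # Find the next edge
--             for edge in edges:
--                 if edge[0] == current_point:
--                     next_point = edge[1]
--                     break
--                 elif edge[1] == current_point:
--                     next_point = edge[0]
--                     break
--             else:
--                 # No matching edge found, end of polygon
--                 break
--
--             polygon.append(next_point)
--             edges.remove(edge)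
--             current_point = next_point
--
--             # Check if we have returned to the start point
--             if current_point == start_edge[0]:
--                 break
--
--         polys.append(polygon)
--     return polys
-- ===== SOURCE B (Python) =====
-- def find_polygons(edges):
--     # Per-point adjacency index built once; lazy removal via alive flags.
--     # Note: A empties its `edges` argument in place; B does not mutate it (return value is the same).
--     n = len(edges)
--     adj = {}
--     for i, e in enumerate(edges):
--         adj.setdefault(e[0], []).append(i)
--         if e[1] != e[0]:
--             adj.setdefault(e[1], []).append(i)
--     alive = [True] * n
--     polys = []
--     for scan in range(n):
--         if not alive[scan]:
--             continue
--         start = edges[scan]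
--         alive[scan] = False
--         cur = start[0]
--         polygon = [cur]
--         while True:
--             j = -1
--             for i in adj.get(cur, ()):
--                 if alive[i]:
--                     j = i
--                     break
--             if j < 0:
--                 break
--             e = edges[j]
--             nxt = e[1] if e[0] == cur else e[0]
--             alive[j] = False
--             polygon.append(nxt)
--             cur = nxt
--             if cur == start[0]:
--                 break
--         polys.append(polygon)
--     return polys
-- ===== Notes on version B (the rewrite author's own statement) =====
-- stated objective: alternative
-- what changed: A rescans the whole remaining edge list for every step of every polygon and removes edges by value; B builds a per-point adjacency index once and walks each chain by looking up only the edges incident to the current point, marking removed edges lazily in an alive-flag array.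
-- outside the precondition, e.g. on find_polygons([(1,)]): A returns [[1]], B raises IndexError; on find_polygons([(1,), (2, 3)]): A returns [[1], [2]], B raises IndexError
import Mathlib
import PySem

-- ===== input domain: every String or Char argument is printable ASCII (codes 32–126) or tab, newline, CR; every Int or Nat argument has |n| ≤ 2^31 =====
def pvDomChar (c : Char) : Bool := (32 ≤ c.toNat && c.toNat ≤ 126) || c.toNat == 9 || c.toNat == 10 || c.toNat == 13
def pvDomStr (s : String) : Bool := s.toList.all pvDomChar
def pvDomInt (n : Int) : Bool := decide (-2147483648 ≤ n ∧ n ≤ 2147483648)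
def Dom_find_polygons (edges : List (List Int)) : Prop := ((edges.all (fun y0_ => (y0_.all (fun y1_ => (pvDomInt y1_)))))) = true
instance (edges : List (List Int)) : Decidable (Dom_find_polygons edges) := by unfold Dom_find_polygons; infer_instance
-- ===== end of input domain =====

-- B builds a per-point adjacency index once and walks each chain through it with lazy
-- alive-flag removal, instead of A's rescan of the whole remaining edge list at every step
-- (return value only: A empties its `edges` argument in place, B does not mutate it).

-- ===== PORT A =====
-- A-side helper: the `for edge in edges: if/elif/break/else` scan.
-- Pre_ guarantees every edge has ≥ 2 endpoints, so `getD` is exact there (Python indexing raises otherwise).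
def pvFindNextA (cur : Int) : List (List Int) → Option (List Int × Int)
  | [] => none
  | e :: rest =>
    if e.getD 0 0 = cur then some (e, e.getD 1 0)
    else if e.getD 1 0 = cur then some (e, e.getD 0 0)
    else pvFindNextA cur rest

-- A-side helper: the inner `while True` loop; fuel = number of remaining edges (each pass removes one edge,
-- and with an empty edge list the loop breaks, so the fuel is only a totality device).
def pvInnerA (startp : Int) : Nat → Int → List Int → List (List Int) → List Int × List (List Int)
  | 0, _, polygon, edges => (polygon, edges)
  | fuel + 1, cur, polygon, edges =>
    match pvFindNextA cur edges with
    | none => (polygon, edges)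
    | some (e, nxt) =>
      let edges' := (PySem.List.remove? edges e).getD edges
      let polygon' := polygon ++ [nxt]
      if nxt = startp then (polygon', edges')
      else pvInnerA startp fuel nxt polygon' edges'

-- A-side helper: the outer `while edges:` loop; fuel = initial number of edges (≥ one edge popped per pass).
def pvOuterA : Nat → List (List Int) → List (List Int) → List (List Int)
  | _, polys, [] => polys
  | 0, polys, _ :: _ => polys
  | fuel + 1, polys, se :: rest =>
    let startp := se.getD 0 0
    let r := pvInnerA startp rest.length startp [startp] rest
    pvOuterA fuel (polys ++ [r.1]) r.2

def find_polygons (edges : List (List Int)) : List (List Int) :=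
  pvOuterA edges.length [] edges

-- ===== PORT B =====
-- B-side helper: adj.setdefault(p, []).append(i)
def pvAdjAdd (adj : PySem.Dict Int (List Nat)) (p : Int) (i : Nat) : PySem.Dict Int (List Nat) :=
  adj.insert p (adj.getD p [] ++ [i])

-- B-side helper: the adjacency-building `for i, e in enumerate(edges)` loop.
def pvBuildAdj (edges : List (List Int)) : PySem.Dict Int (List Nat) :=
  edges.zipIdx.foldl
    (fun adj ei =>
      let adj1 := pvAdjAdd adj (ei.1.getD 0 0) ei.2
      if ei.1.getD 1 0 ≠ ei.1.getD 0 0 then pvAdjAdd adj1 (ei.1.getD 1 0) ei.2 else adj1)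
    PySem.Dict.empty

-- B-side helper: `for i in adj.get(cur, ()): if alive[i]: j = i; break`
def pvFirstAlive (alive : List Bool) : List Nat → Option Nat
  | [] => none
  | i :: is => if alive.getD i false then some i else pvFirstAlive alive is

-- B-side helper: the inner `while True` loop; fuel = number of alive edges (a totality device only).
def pvInnerB (E : List (List Int)) (adj : PySem.Dict Int (List Nat)) (startp : Int) :
    Nat → Int → List Int → List Bool → List Int × List Bool
  | 0, _, polygon, alive => (polygon, alive)
  | fuel + 1, cur, polygon, alive =>
    match pvFirstAlive alive (adj.getD cur []) with
    | none => (polygon, alive)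
    | some j =>
      let e := E.getD j []
      let nxt := if e.getD 0 0 = cur then e.getD 1 0 else e.getD 0 0
      let alive' := alive.set j false
      let polygon' := polygon ++ [nxt]
      if nxt = startp then (polygon', alive')
      else pvInnerB E adj startp fuel nxt polygon' alive'

-- B-side helper: the `for scan in range(n)` loop; k counts down, scan = n - k.
def pvOuterB (E : List (List Int)) (adj : PySem.Dict Int (List Nat)) (n : Nat) :
    Nat → List Bool → List (List Int) → List (List Int)
  | 0, _, polys => polys
  | k + 1, alive, polys =>
    let scan := n - (k + 1)
    if alive.getD scan false then
      let se := E.getD scan []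
      let startp := se.getD 0 0
      let alive1 := alive.set scan false
      let r := pvInnerB E adj startp (alive1.count true) startp [startp] alive1
      pvOuterB E adj n k r.2 (polys ++ [r.1])
    else pvOuterB E adj n k alive polys

def find_polygons_alt (edges : List (List Int)) : List (List Int) :=
  pvOuterB edges (pvBuildAdj edges) edges.length edges.length (List.replicate edges.length true) []

-- ===== PRECONDITION & SPEC =====
-- Pre_ excludes inputs containing an edge with fewer than two endpoints: Python A indexes edge[0]/edge[1]
-- and raises IndexError on most of those inputs, and on the remaining ones (a short edge that is never
-- examined past its existing entries) whether A raises or returns depends on the traversal path, so the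
-- natural domain of two-endpoint edges is stated instead.
def Pre_find_polygons (edges : List (List Int)) : Prop := ∀ e ∈ edges, 2 ≤ e.length
instance (edges : List (List Int)) : Decidable (Pre_find_polygons edges) := by
  unfold Pre_find_polygons; infer_instance

def pvWitness_find_polygons : List (List Int) := [[1, 2], [2, 3], [3, 1], [5, 6]]

def Spec_find_polygons (edges : List (List Int)) (out : List (List Int)) : Prop := out = find_polygons_alt edges
instance (edges : List (List Int)) (out : List (List Int)) : Decidable (Spec_find_polygons edges out) := by unfold Spec_find_polygons; infer_instance

-- ===== CLAIM (what is proved, stated in full; the proofs are below) =====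
def Claim_equal_find_polygons : Prop := ∀ (edges : List (List Int)), Dom_find_polygons edges → Pre_find_polygons edges → Spec_find_polygons edges (find_polygons edges)

-- ===== LEMMAS AND PROOFS =====

-- Proof-side vocabulary -------------------------------------------------------
-- incidence of an edge value to a point (a function of the edge VALUE only)
def pvIncB (cur : Int) (e : List Int) : Bool := (e.getD 0 0 == cur) || (e.getD 1 0 == cur)

-- A's next point for a matched edge (first branch e[1], second branch e[0])
def pvNxt (cur : Int) (e : List Int) : Int := if e.getD 0 0 = cur then e.getD 1 0 else e.getD 0 0

-- the live sublist of E selected by the alive flags (A's current edge list)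
def pvLive : List (List Int) → List Bool → List (List Int)
  | e :: es, b :: bs => if b then e :: pvLive es bs else pvLive es bs
  | _, _ => []

-- first alive index incident to cur (the mediating specification of both searches)
def pvFI (cur : Int) : List (List Int) → List Bool → Option Nat
  | e :: es, b :: bs =>
    if b && pvIncB cur e then some 0 else (pvFI cur es bs).map (· + 1)
  | _, _ => none

-- Adjacency characterization -------------------------------------------------
lemma pvAdjAdd_getD (adj : PySem.Dict Int (List Nat)) (p : Int) (i : Nat) (q : Int) :
    (pvAdjAdd adj p i).getD q [] = adj.getD q [] ++ (if q = p then [i] else []) := by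
  unfold pvAdjAdd
  rw [PySem.Dict.getD_insert]
  split_ifs with h
  · subst h; rfl
  · simp

lemma pvStep_getD (adj : PySem.Dict Int (List Nat)) (e : List Int) (i : Nat) (q : Int) :
    (if e.getD 1 0 ≠ e.getD 0 0 then pvAdjAdd (pvAdjAdd adj (e.getD 0 0) i) (e.getD 1 0) i
      else pvAdjAdd adj (e.getD 0 0) i).getD q [] =
    adj.getD q [] ++ (if pvIncB q e then [i] else []) := by
  by_cases h01 : e.getD 1 0 = e.getD 0 0
  · simp only [h01, ne_eq, not_true_eq_false, if_false, pvAdjAdd_getD, pvIncB]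
    by_cases hq : q = e.getD 0 0
    · subst hq; simp
    · simp [show ¬ q = e[0]?.getD 0 from hq, show ¬ e[0]?.getD 0 = q from fun h => hq h.symm]
  · simp only [ne_eq, h01, not_false_eq_true, if_true, pvAdjAdd_getD, pvIncB, List.append_assoc]
    by_cases hq0 : q = e.getD 0 0 <;> by_cases hq1 : q = e.getD 1 0
    all_goals simp_all [beq_iff_eq]
    all_goals omega

lemma pvBuildAdj_aux (l : List (List Int × Nat)) (d : PySem.Dict Int (List Nat)) (q : Int) :
    (l.foldl (fun adj ei =>
      let adj1 := pvAdjAdd adj (ei.1.getD 0 0) ei.2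
      if ei.1.getD 1 0 ≠ ei.1.getD 0 0 then pvAdjAdd adj1 (ei.1.getD 1 0) ei.2 else adj1) d).getD q []
    = d.getD q [] ++ (l.filter (fun ei => pvIncB q ei.1)).map (·.2) := by
  induction l generalizing d with
  | nil => simp
  | cons ei l ih =>
    simp only [List.foldl_cons, List.filter_cons]
    rw [ih]
    show (if ei.1.getD 1 0 ≠ ei.1.getD 0 0 then pvAdjAdd (pvAdjAdd d (ei.1.getD 0 0) ei.2) (ei.1.getD 1 0) ei.2
      else pvAdjAdd d (ei.1.getD 0 0) ei.2).getD q [] ++ _ = _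
    rw [pvStep_getD]
    by_cases hinc : pvIncB q ei.1 <;> simp [hinc]

lemma pvBuildAdj_getD (E : List (List Int)) (q : Int) :
    (pvBuildAdj E).getD q [] = (E.zipIdx.filter (fun ei => pvIncB q ei.1)).map (·.2) := by
  unfold pvBuildAdj
  rw [pvBuildAdj_aux]
  simp [PySem.Dict.empty, PySem.Dict.getD, PySem.Dict.get?]

-- B's search over the adjacency list = first alive incident index ------------
lemma pvFirstAlive_nil (l : List Nat) : pvFirstAlive [] l = none := by
  induction l with
  | nil => rfl
  | cons i l ih => simp [pvFirstAlive, ih]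

lemma pvFirstAlive_map_succ (b : Bool) (bs : List Bool) (l : List Nat) :
    pvFirstAlive (b :: bs) (l.map (· + 1)) = (pvFirstAlive bs l).map (· + 1) := by
  induction l with
  | nil => rfl
  | cons i l ih =>
    simp only [List.map_cons, pvFirstAlive, List.getD_cons_succ]
    split_ifs <;> simp [ih]

lemma pvFirstAlive_adj (cur : Int) :
    ∀ (es : List (List Int)) (bs : List Bool),
    pvFirstAlive bs ((es.zipIdx.filter (fun ei => pvIncB cur ei.1)).map (·.2)) = pvFI cur es bs := by
  intro es
  induction es with
  | nil => intro bs; cases bs <;> simp [pvFI, pvFirstAlive]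
  | cons e es ih =>
    intro bs
    have hz : (e :: es).zipIdx = (e, 0) :: (es.zipIdx.map (fun p => (p.1, p.2 + 1))) := by
      rw [List.zipIdx_cons, List.zipIdx_succ]
    have hmap : ((es.zipIdx.map (fun p => (p.1, p.2 + 1))).filter
        (fun ei => pvIncB cur ei.1)).map (·.2)
        = ((es.zipIdx.filter (fun ei => pvIncB cur ei.1)).map (·.2)).map (· + 1) := by
      rw [List.filter_map, List.map_map, List.map_map]; rfl
    cases bs with
    | nil => rw [pvFirstAlive_nil]; rfl
    | cons b bs =>
      rw [hz]
      by_cases hinc : pvIncB cur e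
      · simp only [List.filter_cons, hinc, if_true, List.map_cons, hmap]
        show pvFirstAlive (b :: bs) (0 :: _) = _
        cases hb : b with
        | true => simp [pvFirstAlive, pvFI, hinc]
        | false =>
          simp only [pvFirstAlive, List.getD_cons_zero, if_false, Bool.false_eq_true]
          rw [pvFirstAlive_map_succ, ih]
          simp [pvFI, hinc]
      · simp only [List.filter_cons, hinc, if_false, hmap, Bool.false_eq_true]
        rw [pvFirstAlive_map_succ, ih]
        simp [pvFI, hinc]

-- A's search over the live list, against the same specification --------------
lemma pvFI_some_inc {cur : Int} :
    ∀ {es : List (List Int)} {bs : List Bool} {j : Nat},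
    pvFI cur es bs = some j → pvIncB cur (es.getD j []) = true := by
  intro es
  induction es with
  | nil => intro bs j h; cases bs <;> simp [pvFI] at h
  | cons e es ih =>
    intro bs j h
    cases bs with
    | nil => simp [pvFI] at h
    | cons b bs =>
      simp only [pvFI] at h
      split_ifs at h with hc
      · cases h
        obtain ⟨hb, hinc⟩ : b = true ∧ pvIncB cur e = true := by simpa using hc
        simpa using hinc
      · rcases Option.map_eq_some_iff.mp h with ⟨j', hj', rfl⟩
        simpa using ih hj'

lemma pvFindNextA_live_none {cur : Int} :
    ∀ {es : List (List Int)} {bs : List Bool},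
    pvFI cur es bs = none → pvFindNextA cur (pvLive es bs) = none := by
  intro es
  induction es with
  | nil => intro bs _; cases bs <;> rfl
  | cons e es ih =>
    intro bs h
    cases bs with
    | nil => rfl
    | cons b bs =>
      simp only [pvFI] at h
      split_ifs at h with hc
      have htail : pvFI cur es bs = none := by
        cases hfi : pvFI cur es bs
        · rfl
        · rw [hfi] at h; simp at h
      cases hb : b with
        | false => simpa [pvLive, hb] using ih htail
        | true =>
          have hinc : pvIncB cur e = false := by
            cases hic : pvIncB cur e
            · rfl
            · exact absurd (by simp [hb, hic]) hc
          have hni : ¬ e[0]?.getD 0 = cur ∧ ¬ e[1]?.getD 0 = cur := by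
            simpa [pvIncB] using hinc
          have h0 : ¬ e.getD 0 0 = cur := hni.1
          have h1 : ¬ e.getD 1 0 = cur := hni.2
          simp only [pvLive, if_true, pvFindNextA, h0, h1, if_false]
          exact ih htail

lemma pvFindNextA_live_some {cur : Int} :
    ∀ {es : List (List Int)} {bs : List Bool} {j : Nat},
    pvFI cur es bs = some j →
    pvFindNextA cur (pvLive es bs) = some (es.getD j [], pvNxt cur (es.getD j [])) := by
  intro es
  induction es with
  | nil => intro bs j h; cases bs <;> simp [pvFI] at h
  | cons e es ih =>
    intro bs j h
    cases bs with
    | nil => simp [pvFI] at h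
    | cons b bs =>
      simp only [pvFI] at h
      split_ifs at h with hc
      · cases h
        obtain ⟨hb, hinc⟩ : b = true ∧ pvIncB cur e = true := by simpa using hc
        simp only [pvLive, hb, if_true, List.getD_cons_zero]
        by_cases h0 : e.getD 0 0 = cur
        · simp [pvFindNextA, pvNxt, show e[0]?.getD 0 = cur from h0]
        · have hor : e.getD 0 0 = cur ∨ e.getD 1 0 = cur := by
            simpa [pvIncB, beq_iff_eq] using hinc
          have h1 : e.getD 1 0 = cur := hor.resolve_left h0
          simp [pvFindNextA, pvNxt, show ¬e[0]?.getD 0 = cur from h0,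
            show e[1]?.getD 0 = cur from h1]
      · rcases Option.map_eq_some_iff.mp h with ⟨j', hj', rfl⟩
        cases hb : b with
        | false => simpa [pvLive, hb, List.getD_cons_succ] using ih hj'
        | true =>
          have hinc : pvIncB cur e = false := by
            cases hic : pvIncB cur e
            · rfl
            · exact absurd (by simp [hb, hic]) hc
          have hni : ¬ e[0]?.getD 0 = cur ∧ ¬ e[1]?.getD 0 = cur := by
            simpa [pvIncB] using hinc
          have h0 : ¬ e.getD 0 0 = cur := hni.1
          have h1 : ¬ e.getD 1 0 = cur := hni.2
          simp only [pvLive, if_true, pvFindNextA, h0, h1, if_false, List.getD_cons_succ]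
          exact ih hj'

lemma pvRemove_live {cur : Int} :
    ∀ {es : List (List Int)} {bs : List Bool} {j : Nat},
    pvFI cur es bs = some j →
    PySem.List.remove? (pvLive es bs) (es.getD j []) = some (pvLive es (bs.set j false)) := by
  intro es
  induction es with
  | nil => intro bs j h; cases bs <;> simp [pvFI] at h
  | cons e es ih =>
    intro bs j h
    cases bs with
    | nil => simp [pvFI] at h
    | cons b bs =>
      simp only [pvFI] at h
      split_ifs at h with hc
      · cases h
        obtain ⟨hb, hinc⟩ : b = true ∧ pvIncB cur e = true := by simpa using hc
        simp [pvLive, hb, List.set_cons_zero]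
      · rcases Option.map_eq_some_iff.mp h with ⟨j', hj', rfl⟩
        cases hb : b with
        | false => simpa [pvLive, hb, List.set_cons_succ, List.getD_cons_succ] using ih hj'
        | true =>
          have hinc : pvIncB cur e = false := by
            cases hic : pvIncB cur e
            · rfl
            · exact absurd (by simp [hb, hic]) hc
          have hne : e ≠ es.getD j' [] := by
            intro h'
            have := pvFI_some_inc hj'
            rw [← h'] at this
            simp [this] at hinc
          simp only [pvLive, if_true, List.getD_cons_succ, List.set_cons_succ]
          rw [PySem.List.remove?_cons_of_ne _ hne, ih hj']
          rfl

-- Inner-loop correspondence ---------------------------------------------------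
lemma pvInner_corr (E : List (List Int)) (startp : Int) :
    ∀ (fuel : Nat) (cur : Int) (poly : List Int) (alive : List Bool),
    pvInnerA startp fuel cur poly (pvLive E alive) =
      ((pvInnerB E (pvBuildAdj E) startp fuel cur poly alive).1,
       pvLive E (pvInnerB E (pvBuildAdj E) startp fuel cur poly alive).2) := by
  intro fuel
  induction fuel with
  | zero => intro cur poly alive; rfl
  | succ fuel ih =>
    intro cur poly alive
    have hfind : pvFirstAlive alive ((pvBuildAdj E).getD cur []) = pvFI cur E alive := by
      rw [pvBuildAdj_getD, pvFirstAlive_adj]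
    simp only [pvInnerA, pvInnerB, hfind]
    cases hfi : pvFI cur E alive with
    | none => rw [pvFindNextA_live_none hfi]
    | some j =>
      rw [pvFindNextA_live_some hfi]
      simp only [pvRemove_live hfi, Option.getD_some, pvNxt]
      split_ifs <;> first | rfl | exact ih _ _ _

-- Bookkeeping lemmas ----------------------------------------------------------
lemma pvGetD_set_false (alive : List Bool) (j i : Nat) (h : alive.getD i false = false) :
    (alive.set j false).getD i false = false := by
  by_cases hij : i = j
  · subst hij
    by_cases hlt : i < alive.length
    · simp [List.getD, hlt]
    · rw [List.set_eq_of_length_le (by omega)]; exact h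
  · rw [List.getD, List.getElem?_set_ne (by omega)]; exact h

lemma pvGetD_set_self_false (alive : List Bool) (j : Nat) (hj : j < alive.length) :
    (alive.set j false).getD j false = false := by
  simp [List.getD, hj]

lemma pvInnerB_dead (E : List (List Int)) (adj : PySem.Dict Int (List Nat)) (startp : Int) :
    ∀ (fuel : Nat) (cur : Int) (poly : List Int) (alive : List Bool) (i : Nat),
    alive.getD i false = false →
    (pvInnerB E adj startp fuel cur poly alive).2.getD i false = false := by
  intro fuel
  induction fuel with
  | zero => intro _ _ _ _ h; exact h
  | succ fuel ih =>
    intro cur poly alive i h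
    simp only [pvInnerB]
    cases pvFirstAlive alive (adj.getD cur []) with
    | none => exact h
    | some j =>
      simp only
      split_ifs <;>
        first
          | exact pvGetD_set_false _ _ _ h
          | exact ih _ _ _ _ (pvGetD_set_false _ _ _ h)

lemma pvInnerB_length (E : List (List Int)) (adj : PySem.Dict Int (List Nat)) (startp : Int) :
    ∀ (fuel : Nat) (cur : Int) (poly : List Int) (alive : List Bool),
    (pvInnerB E adj startp fuel cur poly alive).2.length = alive.length := by
  intro fuel
  induction fuel with
  | zero => intro _ _ _; rfl
  | succ fuel ih =>
    intro cur poly alive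
    simp only [pvInnerB]
    cases pvFirstAlive alive (adj.getD cur []) with
    | none => rfl
    | some j =>
      simp only
      split_ifs <;> simp [ih]

lemma pvInnerA_length (startp : Int) :
    ∀ (fuel : Nat) (cur : Int) (poly : List Int) (edges : List (List Int)),
    (pvInnerA startp fuel cur poly edges).2.length ≤ edges.length := by
  intro fuel
  induction fuel with
  | zero => intro _ _ _; exact le_rfl
  | succ fuel ih =>
    intro cur poly edges
    simp only [pvInnerA]
    cases hf : pvFindNextA cur edges with
    | none => exact le_rfl
    | some p =>
      obtain ⟨e, nxt⟩ := p
      simp only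
      have hlen : ((PySem.List.remove? edges e).getD edges).length ≤ edges.length := by
        cases hr : PySem.List.remove? edges e with
        | none => exact le_rfl
        | some l' =>
          have hmem : e ∈ edges := by
            by_contra hmem
            rw [(PySem.List.remove?_eq_none_iff _ _).mpr hmem] at hr
            cases hr
          rw [PySem.List.remove?_eq_some_erase _ _ hmem] at hr
          cases hr
          simpa using List.length_erase_le
      split_ifs
      · exact hlen
      · exact le_trans (ih _ _ _) hlen

lemma pvLive_length (E : List (List Int)) :
    ∀ (bs : List Bool), bs.length = E.length → (pvLive E bs).length = bs.count true := by
  induction E with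
  | nil => intro bs h; cases bs with
    | nil => rfl
    | cons b bs => simp at h
  | cons e es ih =>
    intro bs h
    cases bs with
    | nil => simp at h
    | cons b bs =>
      cases b <;> simp [pvLive, ih bs (by simpa using h)]

lemma pvLive_head :
    ∀ (E : List (List Int)) (bs : List Bool) (s : Nat), bs.length = E.length →
    (∀ i < s, bs.getD i false = false) → bs.getD s false = true →
    pvLive E bs = E.getD s [] :: pvLive E (bs.set s false) := by
  intro E
  induction E with
  | nil =>
    intro bs s hlen _ hs
    cases bs with
    | nil => simp [List.getD] at hs
    | cons b bs => simp at hlen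
  | cons e es ih =>
    intro bs s hlen hpre hs
    cases bs with
    | nil => simp at hlen
    | cons b bs =>
      cases s with
      | zero =>
        have hb : b = true := by simpa using hs
        simp [pvLive, hb, List.set_cons_zero]
      | succ s =>
        have hb : b = false := by simpa using hpre 0 (Nat.succ_pos s)
        simp only [pvLive, hb, Bool.false_eq_true, if_false, List.set_cons_succ,
          List.getD_cons_succ]
        rw [ih bs s (by simpa using hlen)
          (fun i hi => by simpa using hpre (i + 1) (by omega))
          (by simpa using hs)]

lemma pvLive_nil_of_dead :
    ∀ (E : List (List Int)) (bs : List Bool), bs.length = E.length →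
    (∀ i < E.length, bs.getD i false = false) → pvLive E bs = [] := by
  intro E
  induction E with
  | nil => intro bs h _; cases bs with
    | nil => rfl
    | cons b bs => simp at h
  | cons e es ih =>
    intro bs hlen hdead
    cases bs with
    | nil => simp at hlen
    | cons b bs =>
      have hb : b = false := by simpa using hdead 0 (by simp)
      simp only [pvLive, hb, Bool.false_eq_true, if_false]
      exact ih bs (by simpa using hlen)
        (fun i hi => by simpa using hdead (i + 1) (by simpa using Nat.succ_lt_succ hi))

lemma pvLive_replicate : ∀ (E : List (List Int)), pvLive E (List.replicate E.length true) = E := by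
  intro E
  induction E with
  | nil => rfl
  | cons e es ih => simp [List.replicate_succ, pvLive, ih]

-- Outer-loop correspondence ---------------------------------------------------
lemma pvOuter_corr (E : List (List Int)) :
    ∀ (k : Nat) (alive : List Bool) (polys : List (List Int)) (fuelA : Nat),
    alive.length = E.length → k ≤ E.length →
    (∀ i < E.length - k, alive.getD i false = false) →
    (pvLive E alive).length ≤ fuelA →
    pvOuterA fuelA polys (pvLive E alive) = pvOuterB E (pvBuildAdj E) E.length k alive polys := by
  intro k
  induction k with
  | zero =>
    intro alive polys fuelA hlen _ hdead _
    rw [pvLive_nil_of_dead E alive hlen (by simpa using hdead)]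
    cases fuelA <;> rfl
  | succ k ih =>
    intro alive polys fuelA hlen hk hdead hfuel
    have hscan : E.length - (k + 1) < E.length := by omega
    by_cases hb : alive.getD (E.length - (k + 1)) false = true
    · have hdecomp := pvLive_head E alive (E.length - (k + 1)) hlen hdead hb
      rw [hdecomp] at hfuel ⊢
      cases fuelA with
      | zero => simp at hfuel
      | succ f =>
        have hlen1 : (alive.set (E.length - (k + 1)) false).length = E.length := by
          simpa using hlen
        have hcount : (pvLive E (alive.set (E.length - (k + 1)) false)).length
            = (alive.set (E.length - (k + 1)) false).count true :=
          pvLive_length E _ hlen1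
        simp only [pvOuterA, pvOuterB, hb, if_true]
        rw [← hcount, pvInner_corr]
        apply ih
        · rw [pvInnerB_length]; exact hlen1
        · omega
        · intro i hi
          have hik : i < E.length - k := hi
          apply pvInnerB_dead
          by_cases his : i = E.length - (k + 1)
          · subst his
            exact pvGetD_set_self_false alive _ (by omega)
          · exact pvGetD_set_false alive _ _ (hdead i (by omega))
        · have hlenA := pvInnerA_length ((E.getD (E.length - (k+1)) []).getD 0 0)
            ((pvLive E (alive.set (E.length - (k + 1)) false)).length)
            ((E.getD (E.length - (k+1)) []).getD 0 0)
            [((E.getD (E.length - (k+1)) []).getD 0 0)]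
            (pvLive E (alive.set (E.length - (k + 1)) false))
          rw [pvInner_corr] at hlenA
          simp only at hlenA
          have h2 : (pvLive E (alive.set (E.length - (k + 1)) false)).length ≤ f := by
            simpa using hfuel
          exact le_trans hlenA h2
    · have hbf : alive.getD (E.length - (k + 1)) false = false := by
        cases h : alive.getD (E.length - (k + 1)) false
        · rfl
        · exact absurd h hb
      simp only [pvOuterB, hbf, Bool.false_eq_true, if_false]
      apply ih alive polys fuelA hlen (by omega) _ hfuel
      intro i hi
      by_cases his : i = E.length - (k + 1)
      · subst his; exact hbf
      · exact hdead i (by omega)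

-- ===== VERDICT (by name: the statement is the Claim_ definition above) =====
theorem find_polygons_spec : Claim_equal_find_polygons := by
  unfold Claim_equal_find_polygons
  intro edges _ _
  unfold Spec_find_polygons find_polygons find_polygons_alt
  have h := pvOuter_corr edges edges.length (List.replicate edges.length true) [] edges.length
    (by simp) le_rfl (by simp) (by rw [pvLive_replicate])
  rw [pvLive_replicate] at h
  exact h
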